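-- pv_equiv track=rewrite | github.com/henryfw/algo | udacity-algo/ps3-6.py | mark_component
-- ===== SOURCE A (Python) =====
-- def mark_component(G, node, marked):
--
--     open_list = [node]
--     total_marked = 0
--
--     while len(open_list) > 0:
--         node = open_list.pop()
--         if node not in marked:
--             marked[node] = True
--             total_marked += 1
--             for neighbor in G[node]:
--                 if neighbor not in marked:
--                     open_list.append(neighbor)
--
--     return total_marked
-- ===== SOURCE B (Python) =====
-- def mark_component(G, node, marked):
--     if node in marked:
--         return 0
--     marked[node] = True
--     total = 1
--     for neighbor in G[node]:
--         total += mark_component(G, neighbor, marked)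
--     return total
-- ===== Notes on version B (the rewrite author's own statement) =====
-- stated objective: alternative
-- what changed: The explicit stack (open_list) with a while-loop, pop and filtered pushes is replaced by direct self-recursion over the neighbors of each newly marked node.
import Mathlib
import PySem

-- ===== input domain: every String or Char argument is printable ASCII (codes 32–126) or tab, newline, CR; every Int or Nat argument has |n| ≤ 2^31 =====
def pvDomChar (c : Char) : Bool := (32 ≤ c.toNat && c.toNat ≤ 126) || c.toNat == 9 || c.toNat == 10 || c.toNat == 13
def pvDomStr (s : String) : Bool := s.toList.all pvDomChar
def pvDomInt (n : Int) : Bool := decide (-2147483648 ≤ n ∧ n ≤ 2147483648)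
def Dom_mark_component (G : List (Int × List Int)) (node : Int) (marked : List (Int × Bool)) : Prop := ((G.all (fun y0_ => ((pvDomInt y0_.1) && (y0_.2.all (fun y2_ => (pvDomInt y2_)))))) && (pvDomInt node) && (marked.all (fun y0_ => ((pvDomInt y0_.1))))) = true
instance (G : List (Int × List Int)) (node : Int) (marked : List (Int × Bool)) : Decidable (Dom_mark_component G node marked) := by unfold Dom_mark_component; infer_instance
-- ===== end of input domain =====

-- B replaces A's explicit stack/while-loop with self-recursion over each marked node's neighbors.
-- Both Pythons mutate `marked` in place (they add exactly the same keys, possibly in a different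
-- insertion order); the equivalence proved here is about the RETURN value.

-- Shared dict primitives: `k in d` on a Python dict, and `d[k]` lookup (first match).
def pvKeyMem (m : List (Int × Bool)) (k : Int) : Bool := m.any (fun p => p.1 == k)

def pvLookup (G : List (Int × List Int)) (k : Int) : Option (List Int) :=
  match G with
  | [] => none
  | (a, ns) :: rest => if a == k then some ns else pvLookup rest k

-- number of (occurrences of) keys of G not yet marked; termination measure for A's while-loop
def pvUnmarked (G : List (Int × List Int)) (m : List (Int × Bool)) : Nat :=
  ((G.map (·.1)).filter (fun k => !pvKeyMem m k)).length

lemma pvKeyMem_append (m ex : List (Int × Bool)) (k : Int) :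
    pvKeyMem (m ++ ex) k = (pvKeyMem m k || pvKeyMem ex k) := by
  simp [pvKeyMem, List.any_append]

lemma pvFilter_mono_lt {l : List Int} {p q : Int → Bool}
    (himp : ∀ x, q x = true → p x = true) {a : Int} (ha : a ∈ l)
    (hpa : p a = true) (hqa : q a = false) :
    (l.filter q).length < (l.filter p).length := by
  induction l with
  | nil => cases ha
  | cons b t ih =>
    rcases List.mem_cons.mp ha with rfl | hb
    · have hle : (t.filter q).length ≤ (t.filter p).length :=
        (List.monotone_filter_right t himp).length_le
      simp only [List.filter_cons, hpa, hqa, if_true, Bool.false_eq_true, if_false,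
        List.length_cons]
      omega
    · have hlt := ih hb
      by_cases hqb : q b = true
      · have hpb := himp b hqb
        simp only [List.filter_cons, hpb, hqb, if_true, List.length_cons]
        omega
      · simp only [Bool.not_eq_true] at hqb
        by_cases hpb : p b = true
        · simp only [List.filter_cons, hpb, hqb, if_true, Bool.false_eq_true, if_false,
            List.length_cons]
          omega
        · simp only [Bool.not_eq_true] at hpb
          simp only [List.filter_cons, hpb, hqb, Bool.false_eq_true, if_false]
          omega

lemma pvLookup_mem_keys {G : List (Int × List Int)} {k : Int} {ns : List Int}
    (h : pvLookup G k = some ns) : k ∈ G.map (·.1) := by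
  induction G with
  | nil => simp [pvLookup] at h
  | cons p rest ih =>
    obtain ⟨a, vs⟩ := p
    by_cases hek : a == k
    · simp [beq_iff_eq] at hek; simp [hek]
    · simp only [pvLookup, hek, Bool.false_eq_true, if_false] at h
      simp [ih h]

lemma pvUnmarked_append_lt {G : List (Int × List Int)} {m : List (Int × Bool)} {n : Int}
    {ns : List Int} (hlk : pvLookup G n = some ns) (hnm : pvKeyMem m n = false) :
    pvUnmarked G (m ++ [(n, true)]) < pvUnmarked G m := by
  refine pvFilter_mono_lt ?_ (pvLookup_mem_keys hlk) ?_ ?_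
  · intro x hx
    simp only [Bool.not_eq_eq_eq_not, Bool.not_true, pvKeyMem_append, Bool.or_eq_false_iff] at hx ⊢
    exact hx.1
  · simp [hnm]
  · simp [pvKeyMem]

-- ===== PORT A =====
-- A's while-loop.  The Lean stack holds Python's `open_list` REVERSED (head = top of stack), so
-- `open_list.pop()` is taking the head, and appending the kept neighbors in order is prepending
-- their reversal.  In the branch where Python's `G[node]` raises KeyError (node not a key of G)
-- the port returns the current total; such inputs are outside Pre_.
def markLoopA (G : List (Int × List Int)) : List Int → List (Int × Bool) → Int → Int
  | [], _, total => total
  | n :: rest, marked, total =>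
    if pvKeyMem marked n then markLoopA G rest marked total
    else
      match h : pvLookup G n with
      | none => total
      | some ns =>
        markLoopA G ((ns.filter (fun nb => !pvKeyMem (marked ++ [(n, true)]) nb)).reverse ++ rest)
          (marked ++ [(n, true)]) (total + 1)
termination_by stack marked _ => (pvUnmarked G marked, stack.length)
decreasing_by
  · exact Prod.Lex.right _ (by simp)
  · exact Prod.Lex.left _ _ (pvUnmarked_append_lt h (by simpa using ‹¬pvKeyMem marked n = true›))

def mark_component (G : List (Int × List Int)) (node : Int) (marked : List (Int × Bool)) : Int :=
  markLoopA G [node] marked 0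

-- ===== PORT B =====
-- B's recursion, with the in-place mutated dict threaded through as state and a fuel argument as
-- a totality guard (fuel G.length + 1 is always sufficient: each recursive descent marks a fresh
-- key of G first — proved in dfsBF_char below).  In the branch where Python's `G[node]` raises
-- KeyError the port returns (1, marked'); outside Pre_.
mutual
def dfsBF (G : List (Int × List Int)) : Nat → Int → List (Int × Bool) → Int × List (Int × Bool)
  | 0, _, m => (0, m)
  | fuel + 1, node, m =>
    if pvKeyMem m node then (0, m)
    else
      match pvLookup G node with
      | none => (1, m ++ [(node, true)])
      | some ns => dfsLF G fuel ns (m ++ [(node, true)]) 1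
termination_by fuel _ _ => (fuel, 0)

def dfsLF (G : List (Int × List Int)) : Nat → List Int → List (Int × Bool) → Int → Int × List (Int × Bool)
  | _, [], m, t => (t, m)
  | fuel, nb :: rest, m, t =>
    let r := dfsBF G fuel nb m
    dfsLF G fuel rest r.2 (t + r.1)
termination_by fuel ns _ _ => (fuel, ns.length + 1)
end

def mark_component_alt (G : List (Int × List Int)) (node : Int) (marked : List (Int × Bool)) : Int :=
  (dfsBF G (G.length + 1) node marked).1

-- ===== PRECONDITION & SPEC =====
-- `pvStep` adds to a node set S the still-unmarked neighbors of its member keys; iterating it to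
-- saturation from {node} yields exactly the set of nodes reachable from `node` through unmarked
-- nodes (a plain graph-closure computation, distinct from both ports' traversals).
def pvStep (G : List (Int × List Int)) (m : List (Int × Bool)) (S : List Int) : List Int :=
  S ++ ((G.filter (fun p => S.contains p.1)).flatMap (fun p => p.2)).filter
        (fun y => !pvKeyMem m y && !S.contains y)

def pvReachSet (G : List (Int × List Int)) (m : List (Int × Bool)) (node : Int) : List Int :=
  (pvStep G m)^[(node :: G.flatMap (fun p => p.2)).length]
    (if pvKeyMem m node then [] else [node])

-- Pre_ excludes EXACTLY the inputs on which Python A raises KeyError — those where some node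
-- reachable from `node` through unmarked nodes is not a key of G (B raises KeyError there too);
-- on every other input A returns normally and Pre_ holds.
def Pre_mark_component (G : List (Int × List Int)) (node : Int) (marked : List (Int × Bool)) : Prop :=
  ∀ y ∈ pvReachSet G marked node, (G.map (·.1)).contains y = true
instance (G : List (Int × List Int)) (node : Int) (marked : List (Int × Bool)) : Decidable (Pre_mark_component G node marked) := by unfold Pre_mark_component; infer_instance

def pvWitness_mark_component : (List (Int × List Int)) × Int × (List (Int × Bool)) :=
  ([(0, [1, 2]), (1, [0]), (2, [2])], 0, [(3, false)])

def Spec_mark_component (G : List (Int × List Int)) (node : Int) (marked : List (Int × Bool)) (out : Int) : Prop := out = mark_component_alt G node marked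
instance (G : List (Int × List Int)) (node : Int) (marked : List (Int × Bool)) (out : Int) : Decidable (Spec_mark_component G node marked out) := by unfold Spec_mark_component; infer_instance

-- ===== CLAIM (what is proved, stated in full; the proofs are below) =====
def Claim_equal_mark_component : Prop := ∀ (G : List (Int × List Int)) (node : Int) (marked : List (Int × Bool)), Dom_mark_component G node marked → Pre_mark_component G node marked → Spec_mark_component G node marked (mark_component G node marked)

-- ===== LEMMAS AND PROOFS =====

lemma pvKeyMem_single (n : Int) (b : Bool) (k : Int) : pvKeyMem [(n, b)] k = (n == k) := by
  simp [pvKeyMem]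

lemma pvUnmarked_append_le (G : List (Int × List Int)) (m ex : List (Int × Bool)) :
    pvUnmarked G (m ++ ex) ≤ pvUnmarked G m := by
  apply List.Sublist.length_le
  apply List.monotone_filter_right
  intro x hx
  simp only [pvKeyMem_append, Bool.not_eq_eq_eq_not, Bool.not_true, Bool.or_eq_false_iff] at *
  exact hx.1

-- y is reachable from n through nodes unmarked in m
inductive ReachU (G : List (Int × List Int)) (m : List (Int × Bool)) (n : Int) : Int → Prop
  | refl : pvKeyMem m n = false → ReachU G m n n
  | step {x y : Int} {ns : List Int} : ReachU G m n x → pvLookup G x = some ns → y ∈ ns →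
      pvKeyMem m y = false → ReachU G m n y

def ReachL (G : List (Int × List Int)) (m : List (Int × Bool)) (l : List Int) (y : Int) : Prop :=
  ∃ n ∈ l, ReachU G m n y

theorem reach_unmarked {G m n y} (h : ReachU G m n y) : pvKeyMem m y = false := by
  cases h with
  | refl h => exact h
  | step _ _ _ h => exact h

theorem not_reach_of_marked {G m n y} (hm : pvKeyMem m n = true) : ¬ ReachU G m n y := by
  intro h
  induction h with
  | refl h => exact absurd hm (by simp [h])
  | step _ _ _ _ ih => exact ih

theorem reach_mono_down {G m m2 n y} (hsub : ∀ k, pvKeyMem m k = true → pvKeyMem m2 k = true)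
    (h : ReachU G m2 n y) : ReachU G m n y := by
  have unm : ∀ k, pvKeyMem m2 k = false → pvKeyMem m k = false := by
    intro k hk
    by_contra hc
    simp only [Bool.not_eq_false] at hc
    simp [hsub k hc] at hk
  induction h with
  | refl h => exact ReachU.refl (unm _ h)
  | step _ hlk hy hunm ih => exact ReachU.step ih hlk hy (unm _ hunm)

theorem reach_trans {G m n z y} (h2 : ReachU G m z y) (h1 : ReachU G m n z) : ReachU G m n y := by
  induction h2 with
  | refl _ => exact h1
  | step _ hlk hy hunm ih => exact ReachU.step ih hlk hy hunm

-- the central decomposition: marking n and replacing it on the agenda by its neighbors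
theorem reach_insert {G : List (Int × List Int)} {m : List (Int × Bool)} {n : Int} {ns : List Int}
    (hnm : pvKeyMem m n = false) (hns : pvLookup G n = some ns) (rest : List Int) (y : Int) :
    ReachL G m (n :: rest) y ↔ y = n ∨ ReachL G (m ++ [(n, true)]) (ns ++ rest) y := by
  have hsub : ∀ k, pvKeyMem m k = true → pvKeyMem (m ++ [(n, true)]) k = true := by
    intro k hk; simp [pvKeyMem_append, hk]
  constructor
  · rintro ⟨z, hz, hr⟩
    induction hr with
    | refl h =>
      rcases List.mem_cons.mp hz with rfl | hzr
      · exact Or.inl rfl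
      · by_cases hzn : z = n
        · exact Or.inl hzn
        · refine Or.inr ⟨z, by simp [hzr], ReachU.refl ?_⟩
          have hnz : (n == z) = false := beq_eq_false_iff_ne.mpr (fun h' => hzn h'.symm)
          simp [pvKeyMem_append, pvKeyMem_single, h, hnz]
    | step hx hlk hy hunm ih =>
      rename_i x y' ns'
      by_cases hyn : y' = n
      · exact Or.inl hyn
      · have hy'unm : pvKeyMem (m ++ [(n, true)]) y' = false := by
          have hny : (n == y') = false := beq_eq_false_iff_ne.mpr (fun h' => hyn h'.symm)
          simp [pvKeyMem_append, pvKeyMem_single, hunm, hny]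
        rcases ih with rfl | ⟨w, hw, hrw⟩
        · -- x = n, so ns' = ns and y' is a neighbor of n
          have : ns' = ns := by rw [hlk] at hns; exact Option.some_inj.mp hns
          subst this
          exact Or.inr ⟨y', by simp [hy], ReachU.refl hy'unm⟩
        · exact Or.inr ⟨w, hw, ReachU.step hrw hlk hy hy'unm⟩
  · rintro (rfl | ⟨z, hz, hr⟩)
    · exact ⟨y, by simp, ReachU.refl hnm⟩
    · have hrm : ReachU G m z y := reach_mono_down hsub hr
      rcases List.mem_append.mp hz with hzns | hzrest
      · have hzunm : pvKeyMem m z = false := by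
          have := reach_unmarked hr
          by_contra hc
          simp only [Bool.not_eq_false] at hc
          exact absurd hrm (not_reach_of_marked hc)
        have hnz : ReachU G m n z := ReachU.step (ReachU.refl hnm) hns hzns (by
          by_contra hc
          simp only [Bool.not_eq_false] at hc
          exact absurd hrm (not_reach_of_marked hc))
        exact ⟨n, by simp, reach_trans hrm hnz⟩
      · exact ⟨z, by simp [hzrest], hrm⟩

-- sequential composition: after marking exactly the m-reachable set of nb, the remaining agenda
-- reaches the same nodes
theorem reach_seq {G : List (Int × List Int)} {m m2 : List (Int × Bool)} {nb : Int}
    (hkeys : ∀ k, pvKeyMem m2 k = true ↔ (pvKeyMem m k = true ∨ ReachU G m nb k))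
    (rest : List Int) (y : Int) :
    ReachL G m (nb :: rest) y ↔ ReachU G m nb y ∨ ReachL G m2 rest y := by
  have hsub : ∀ k, pvKeyMem m k = true → pvKeyMem m2 k = true := fun k hk =>
    (hkeys k).mpr (Or.inl hk)
  constructor
  · rintro ⟨z, hz, hr⟩
    rcases List.mem_cons.mp hz with rfl | hzr
    · exact Or.inl hr
    · -- shift the path from m to m2 unless it enters the nb-reachable set
      have core : ReachU G m nb y ∨ ReachU G m2 z y := by
        clear hz
        induction hr with
        | refl h =>
          by_cases hP : ReachU G m nb z
          · exact Or.inl hP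
          · refine Or.inr (ReachU.refl ?_)
            by_contra hc
            simp only [Bool.not_eq_false] at hc
            rcases (hkeys z).mp hc with hmk | hP'
            · simp [h] at hmk
            · exact hP hP'
        | step hx hlk hy hunm ih =>
          rename_i x y' ns'
          rcases ih with hP | hm2
          · exact Or.inl (ReachU.step hP hlk hy hunm)
          · by_cases hPy : ReachU G m nb y'
            · exact Or.inl hPy
            · refine Or.inr (ReachU.step hm2 hlk hy ?_)
              by_contra hc
              simp only [Bool.not_eq_false] at hc
              rcases (hkeys y').mp hc with hmk | hP'
              · simp [hunm] at hmk
              · exact hPy hP'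
      rcases core with h | h
      · exact Or.inl h
      · exact Or.inr ⟨z, hzr, h⟩
  · rintro (h | ⟨z, hz, hr⟩)
    · exact ⟨nb, by simp, h⟩
    · exact ⟨z, by simp [hz], reach_mono_down hsub hr⟩

theorem pvContains_iff_lookup {G : List (Int × List Int)} {k : Int} :
    (G.map (·.1)).contains k = true ↔ ∃ ns, pvLookup G k = some ns := by
  induction G with
  | nil => simp [pvLookup]
  | cons p rest ih =>
    obtain ⟨a, vs⟩ := p
    by_cases hek : a = k
    · subst hek; simp [pvLookup]
    · simp only [List.map_cons, List.contains_cons, pvLookup,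
        show (a == k) = false by simp [hek], Bool.false_eq_true, if_false, Bool.or_eq_true,
        beq_iff_eq]
      constructor
      · rintro (h | h)
        · exact absurd h.symm hek
        · exact ih.mp h
      · intro h; exact Or.inr (ih.mpr h)

theorem pvLookup_pair_mem {G : List (Int × List Int)} {k : Int} {ns : List Int}
    (h : pvLookup G k = some ns) : (k, ns) ∈ G := by
  induction G with
  | nil => simp [pvLookup] at h
  | cons p rest ih =>
    obtain ⟨a, vs⟩ := p
    by_cases hek : a == k
    · simp only [pvLookup, hek, if_true] at h
      simp only [beq_iff_eq] at hek
      subst hek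
      simp [Option.some_inj.mp h]
    · simp only [pvLookup, hek, Bool.false_eq_true, if_false] at h
      simp [ih h]

-- characterization of A's loop under the hypothesis that every node reachable through unmarked
-- nodes from the stack is a key of G (= Python A does not raise): it returns total + |newly
-- marked set|, that set being exactly what is reachable from the stack
theorem markLoopA_char (G : List (Int × List Int)) (stack : List Int) (m : List (Int × Bool))
    (t : Int) : (∀ y, ReachL G m stack y → (G.map (·.1)).contains y = true) →
    ∃ ex : List Int, ex.Nodup ∧ (∀ y, y ∈ ex ↔ ReachL G m stack y) ∧
      markLoopA G stack m t = t + ex.length := by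
  fun_induction markLoopA G stack m t with
  | case1 m t =>
    intro _
    exact ⟨[], List.nodup_nil, by simp [ReachL], by simp⟩
  | case2 n rest m t hmark ih =>
    intro H
    obtain ⟨ex, hnd, hmem, heq⟩ := ih (by
      rintro y ⟨z, hz, hr⟩
      exact H y ⟨z, List.mem_cons_of_mem _ hz, hr⟩)
    refine ⟨ex, hnd, ?_, heq⟩
    intro y
    rw [hmem y]
    constructor
    · rintro ⟨z, hz, hr⟩; exact ⟨z, List.mem_cons_of_mem _ hz, hr⟩
    · rintro ⟨z, hz, hr⟩
      rcases List.mem_cons.mp hz with rfl | hz'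
      · exact absurd hr (not_reach_of_marked hmark)
      · exact ⟨z, hz', hr⟩
  | case3 n rest m t hmark h =>
    intro H
    have hnm : pvKeyMem m n = false := by simpa using hmark
    have hcont := H n ⟨n, List.mem_cons_self, ReachU.refl hnm⟩
    obtain ⟨ns, hns⟩ := pvContains_iff_lookup.mp hcont
    rw [h] at hns
    cases hns
  | case4 n rest m t hmark ns h ih =>
    intro H
    have hnm : pvKeyMem m n = false := by simpa using hmark
    have hfilt : ∀ w, ReachL G (m ++ [(n, true)])
        ((ns.filter fun nb => !pvKeyMem (m ++ [(n, true)]) nb).reverse ++ rest) w ↔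
        ReachL G (m ++ [(n, true)]) (ns ++ rest) w := by
      intro w
      constructor
      · rintro ⟨z, hz, hr⟩
        rcases List.mem_append.mp hz with hzf | hzr
        · exact ⟨z, List.mem_append_left _ (List.mem_of_mem_filter (List.mem_reverse.mp hzf)), hr⟩
        · exact ⟨z, List.mem_append_right _ hzr, hr⟩
      · rintro ⟨z, hz, hr⟩
        rcases List.mem_append.mp hz with hzn | hzr
        · by_cases hzm : pvKeyMem (m ++ [(n, true)]) z = true
          · exact absurd hr (not_reach_of_marked hzm)
          · refine ⟨z, List.mem_append_left _ ?_, hr⟩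
            rw [List.mem_reverse]
            exact List.mem_filter.mpr ⟨hzn, by simp [Bool.not_eq_true] at hzm ⊢; exact hzm⟩
        · exact ⟨z, List.mem_append_right _ hzr, hr⟩
    obtain ⟨ex, hnd, hmem, heq⟩ := ih (by
      intro y hy
      exact H y ((reach_insert hnm h rest y).mpr (Or.inr ((hfilt y).mp hy))))
    have hmarkn : pvKeyMem (m ++ [(n, true)]) n = true := by
      simp [pvKeyMem]
    refine ⟨n :: ex, ?_, ?_, ?_⟩
    · refine List.nodup_cons.mpr ⟨?_, hnd⟩
      intro hn
      have := reach_unmarked (((hmem n).mp hn).choose_spec.2)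
      simp [hmarkn] at this
    · intro y
      rw [List.mem_cons, hmem y, hfilt y, reach_insert hnm h rest y]
    · rw [heq, List.length_cons]
      push_cast
      ring
-- keys added by B are exactly the list of newly marked nodes
lemma pvKeyMem_map_true (l : List Int) (k : Int) :
    pvKeyMem (l.map (fun y => (y, true))) k = true ↔ k ∈ l := by
  simp only [pvKeyMem, List.any_map, Function.comp, List.any_eq_true, beq_iff_eq]
  exact ⟨fun ⟨x, hx, he⟩ => he ▸ hx, fun h => ⟨k, h, rfl⟩⟩

lemma reachL_unmarked {G : List (Int × List Int)} {m : List (Int × Bool)} {l : List Int} {y : Int}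
    (h : ReachL G m l y) : pvKeyMem m y = false := by
  obtain ⟨z, _, hr⟩ := h
  exact reach_unmarked hr

lemma reachU_singleton {G : List (Int × List Int)} {m : List (Int × Bool)} {n y : Int} :
    ReachL G m [n] y ↔ ReachU G m n y := by
  constructor
  · rintro ⟨z, hz, hr⟩
    rcases List.mem_cons.mp hz with rfl | hz'
    · exact hr
    · cases hz'
  · exact fun hr => ⟨n, List.mem_cons_self, hr⟩

-- characterization of B's recursion under the same no-raise hypothesis: with sufficient fuel it
-- marks exactly the reachable set and returns its size
theorem dfsBF_char (G : List (Int × List Int)) (f : Nat) :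
    (∀ n m, (∀ y, ReachU G m n y → (G.map (·.1)).contains y = true) → pvUnmarked G m < f →
      ∃ ex : List Int, ex.Nodup ∧ (∀ y, y ∈ ex ↔ ReachU G m n y) ∧
        (dfsBF G f n m).2 = m ++ ex.map (fun y => (y, true)) ∧
        (dfsBF G f n m).1 = ex.length) ∧
    (∀ ns m t, (∀ y, ReachL G m ns y → (G.map (·.1)).contains y = true) → pvUnmarked G m < f →
      ∃ ex : List Int, ex.Nodup ∧ (∀ y, y ∈ ex ↔ ReachL G m ns y) ∧
        (dfsLF G f ns m t).2 = m ++ ex.map (fun y => (y, true)) ∧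
        (dfsLF G f ns m t).1 = t + ex.length) := by
  induction f with
  | zero =>
    exact ⟨fun n m _ hlt => absurd hlt (Nat.not_lt_zero _),
      fun ns m t _ hlt => absurd hlt (Nat.not_lt_zero _)⟩
  | succ f ihf =>
    obtain ⟨ihB, ihL⟩ := ihf
    have PB1 : ∀ n m, (∀ y, ReachU G m n y → (G.map (·.1)).contains y = true) →
        pvUnmarked G m < f + 1 →
        ∃ ex : List Int, ex.Nodup ∧ (∀ y, y ∈ ex ↔ ReachU G m n y) ∧
          (dfsBF G (f + 1) n m).2 = m ++ ex.map (fun y => (y, true)) ∧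
          (dfsBF G (f + 1) n m).1 = ex.length := by
      intro n m H hlt
      by_cases hmark : pvKeyMem m n = true
      · refine ⟨[], List.nodup_nil, ?_, ?_, ?_⟩
        · intro y
          simp only [List.not_mem_nil, false_iff]
          exact not_reach_of_marked hmark
        · simp [dfsBF, hmark]
        · simp [dfsBF, hmark]
      · have hnm : pvKeyMem m n = false := by simpa using hmark
        obtain ⟨ns, hns⟩ := pvContains_iff_lookup.mp (H n (ReachU.refl hnm))
        have hlt' : pvUnmarked G (m ++ [(n, true)]) < f := by
          have := pvUnmarked_append_lt hns hnm
          omega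
        have H' : ∀ y, ReachL G (m ++ [(n, true)]) ns y →
            (G.map (·.1)).contains y = true := by
          intro y hy
          refine H y (reachU_singleton.mp ((reach_insert hnm hns [] y).mpr (Or.inr ?_)))
          simpa using hy
        obtain ⟨exL, hnd, hmem, hm2, hcount⟩ := ihL ns (m ++ [(n, true)]) 1 H' hlt'
        have hBval : dfsBF G (f + 1) n m = dfsLF G f ns (m ++ [(n, true)]) 1 := by
          simp [dfsBF, hmark, hns]
        have hmarkn : pvKeyMem (m ++ [(n, true)]) n = true := by simp [pvKeyMem]
        refine ⟨n :: exL, ?_, ?_, ?_, ?_⟩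
        · refine List.nodup_cons.mpr ⟨?_, hnd⟩
          intro hn
          have := reachL_unmarked ((hmem n).mp hn)
          simp [hmarkn] at this
        · intro y
          rw [List.mem_cons, hmem y]
          rw [← reachU_singleton (m := m)]
          rw [reach_insert hnm hns [] y, List.append_nil]
        · rw [hBval, hm2]
          simp [List.append_assoc]
        · rw [hBval, hcount, List.length_cons]
          push_cast
          ring
    refine ⟨PB1, ?_⟩
    intro ns
    induction ns with
    | nil =>
      intro m t _ _
      exact ⟨[], List.nodup_nil, by simp [ReachL], by simp [dfsLF], by simp [dfsLF]⟩
    | cons nb rest ihl =>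
      intro m t H hlt
      obtain ⟨exB, hndB, hmemB, hm2, hcntB⟩ :=
        PB1 nb m (fun y hy => H y ⟨nb, List.mem_cons_self, hy⟩) hlt
      have hkeys : ∀ k, pvKeyMem (dfsBF G (f + 1) nb m).2 k = true ↔
          (pvKeyMem m k = true ∨ ReachU G m nb k) := by
        intro k
        rw [hm2, pvKeyMem_append]
        simp only [Bool.or_eq_true, pvKeyMem_map_true, hmemB k]
      have H2 : ∀ y, ReachL G (dfsBF G (f + 1) nb m).2 rest y →
          (G.map (·.1)).contains y = true := by
        intro y hy
        exact H y ((reach_seq hkeys rest y).mpr (Or.inr hy))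
      have hlt2 : pvUnmarked G (dfsBF G (f + 1) nb m).2 < f + 1 := by
        rw [hm2]
        have := pvUnmarked_append_le G m (exB.map (fun y => (y, true)))
        omega
      obtain ⟨exL, hndL, hmemL, hm3, hcntL⟩ :=
        ihl (dfsBF G (f + 1) nb m).2 (t + (dfsBF G (f + 1) nb m).1) H2 hlt2
      have hLval : dfsLF G (f + 1) (nb :: rest) m t =
          dfsLF G (f + 1) rest (dfsBF G (f + 1) nb m).2 (t + (dfsBF G (f + 1) nb m).1) := by
        simp [dfsLF]
      refine ⟨exB ++ exL, ?_, ?_, ?_, ?_⟩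
      · refine hndB.append hndL ?_
        intro a haB haL
        have h1 : pvKeyMem (dfsBF G (f + 1) nb m).2 a = true :=
          (hkeys a).mpr (Or.inr ((hmemB a).mp haB))
        have h2 := reachL_unmarked ((hmemL a).mp haL)
        simp [h1] at h2
      · intro y
        rw [List.mem_append, hmemB y, hmemL y]
        exact (reach_seq hkeys rest y).symm
      · rw [hLval, hm3, hm2]
        simp [List.append_assoc]
      · rw [hLval, hcntL, hcntB, List.length_append]
        push_cast
        ring

theorem pvUnmarked_le (G : List (Int × List Int)) (m : List (Int × Bool)) :
    pvUnmarked G m ≤ G.length := by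
  calc pvUnmarked G m ≤ (G.map (·.1)).length := List.length_filter_le _ _
    _ = G.length := by simp

-- ===== closure lemmas: Pre_ implies every reachable node is a key of G =====

lemma mem_pvStep {G : List (Int × List Int)} {m : List (Int × Bool)} {S : List Int} {x : Int} :
    x ∈ pvStep G m S ↔
      x ∈ S ∨ ∃ p ∈ G, p.1 ∈ S ∧ x ∈ p.2 ∧ pvKeyMem m x = false ∧ x ∉ S := by
  simp only [pvStep, List.mem_append, List.mem_filter, List.mem_flatMap, Bool.and_eq_true,
    Bool.not_eq_eq_eq_not, Bool.not_true, List.contains_eq_mem, decide_eq_true_eq,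
    decide_eq_false_iff_not]
  constructor
  · rintro (h | ⟨⟨p, ⟨hp, hp1⟩, hx⟩, hu, hns⟩)
    · exact Or.inl h
    · exact Or.inr ⟨p, hp, hp1, hx, hu, hns⟩
  · rintro (h | ⟨p, hp, hp1, hx, hu, hns⟩)
    · exact Or.inl h
    · exact Or.inr ⟨⟨p, ⟨hp, hp1⟩, hx⟩, hu, hns⟩

lemma subset_pvStep {G : List (Int × List Int)} {m : List (Int × Bool)} {S : List Int} {x : Int}
    (h : x ∈ S) : x ∈ pvStep G m S := List.mem_append_left _ h

lemma pvStep_subset_univ {G : List (Int × List Int)} {m : List (Int × Bool)} {S : List Int}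
    {x : Int} (h : x ∈ pvStep G m S) : x ∈ S ∨ x ∈ G.flatMap (fun p => p.2) := by
  rcases mem_pvStep.mp h with h | ⟨p, hp, _, hx, _, _⟩
  · exact Or.inl h
  · exact Or.inr (List.mem_flatMap.mpr ⟨p, hp, hx⟩)

lemma pvStep_congr {G : List (Int × List Int)} {m : List (Int × Bool)} {S T : List Int}
    (h : ∀ x : Int, x ∈ S ↔ x ∈ T) (x : Int) : x ∈ pvStep G m S ↔ x ∈ pvStep G m T := by
  rw [mem_pvStep, mem_pvStep]
  constructor
  · rintro (hx | ⟨p, hp, hp1, hxp, hu, hns⟩)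
    · exact Or.inl ((h x).mp hx)
    · exact Or.inr ⟨p, hp, (h p.1).mp hp1, hxp, hu, fun hc => hns ((h x).mpr hc)⟩
  · rintro (hx | ⟨p, hp, hp1, hxp, hu, hns⟩)
    · exact Or.inl ((h x).mpr hx)
    · exact Or.inr ⟨p, hp, (h p.1).mpr hp1, hxp, hu, fun hc => hns ((h x).mp hc)⟩

-- a set closed under pvStep
def pvClosedSet (G : List (Int × List Int)) (m : List (Int × Bool)) (S : List Int) : Prop :=
  ∀ x, x ∈ pvStep G m S → x ∈ S

lemma iter_mono {G : List (Int × List Int)} {m : List (Int × Bool)} (S0 : List Int) (k : Nat)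
    {x : Int} (h : x ∈ S0) : x ∈ (pvStep G m)^[k] S0 := by
  induction k with
  | zero => exact h
  | succ k ih =>
    rw [Function.iterate_succ_apply']
    exact subset_pvStep ih

lemma closed_succ {G : List (Int × List Int)} {m : List (Int × Bool)} {S0 : List Int} {k : Nat}
    (h : pvClosedSet G m ((pvStep G m)^[k] S0)) : pvClosedSet G m ((pvStep G m)^[k + 1] S0) := by
  have hmem : ∀ x : Int, x ∈ (pvStep G m)^[k + 1] S0 ↔ x ∈ (pvStep G m)^[k] S0 := by
    intro x
    rw [Function.iterate_succ_apply']
    exact ⟨fun hx => h x hx, subset_pvStep⟩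
  intro x hx
  rw [Function.iterate_succ_apply']
  exact subset_pvStep (h x ((pvStep_congr hmem x).mp hx))

lemma closed_add {G : List (Int × List Int)} {m : List (Int × Bool)} {S0 : List Int} {k : Nat}
    (j : Nat) (h : pvClosedSet G m ((pvStep G m)^[k] S0)) :
    pvClosedSet G m ((pvStep G m)^[k + j] S0) := by
  induction j with
  | zero => exact h
  | succ j ih =>
    have h2 := closed_succ ih
    rw [Nat.add_succ]
    exact h2

lemma meas_decrease {G : List (Int × List Int)} {m : List (Int × Bool)} {S0 U : List Int}
    {k : Nat} (_hsub : ∀ x, x ∈ (pvStep G m)^[k] S0 → x ∈ U)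
    (hU : ∀ x, x ∈ G.flatMap (fun p => p.2) → x ∈ U)
    (h : ¬ pvClosedSet G m ((pvStep G m)^[k] S0)) :
    (U.filter (fun y => !((pvStep G m)^[k + 1] S0).contains y)).length <
      (U.filter (fun y => !((pvStep G m)^[k] S0).contains y)).length := by
  simp only [pvClosedSet, not_forall] at h
  obtain ⟨x, hx, hnx⟩ := h
  have hxU : x ∈ U := by
    rcases pvStep_subset_univ hx with h | h
    · exact absurd h hnx
    · exact hU x h
  refine pvFilter_mono_lt ?_ hxU ?_ ?_
  · intro y hy
    simp only [Bool.not_eq_eq_eq_not, Bool.not_true, List.contains_eq_mem,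
      decide_eq_false_iff_not] at hy ⊢
    intro hc
    exact hy (by rw [Function.iterate_succ_apply']; exact subset_pvStep hc)
  · simp only [Bool.not_eq_eq_eq_not, Bool.not_true, List.contains_eq_mem,
      decide_eq_false_iff_not]
    exact hnx
  · simp only [Bool.not_eq_eq_eq_not, Bool.not_false, List.contains_eq_mem, decide_eq_true_eq]
    rw [Function.iterate_succ_apply']
    exact hx

lemma iter_subset_univ {G : List (Int × List Int)} {m : List (Int × Bool)} {S0 U : List Int}
    (hS0 : ∀ x, x ∈ S0 → x ∈ U) (hU : ∀ x, x ∈ G.flatMap (fun p => p.2) → x ∈ U) (k : Nat) :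
    ∀ x, x ∈ (pvStep G m)^[k] S0 → x ∈ U := by
  induction k with
  | zero => exact hS0
  | succ k ih =>
    intro x hx
    rw [Function.iterate_succ_apply'] at hx
    rcases pvStep_subset_univ hx with h | h
    · exact ih x h
    · exact hU x h

-- after |U| iterations the closure has stabilized
lemma closed_at_univ_len {G : List (Int × List Int)} {m : List (Int × Bool)} {S0 U : List Int}
    (hS0 : ∀ x, x ∈ S0 → x ∈ U) (hU : ∀ x, x ∈ G.flatMap (fun p => p.2) → x ∈ U) :
    pvClosedSet G m ((pvStep G m)^[U.length] S0) := by
  have hex : ∃ k ≤ U.length, pvClosedSet G m ((pvStep G m)^[k] S0) := by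
    by_contra hc
    push Not at hc
    have haux : ∀ k, k ≤ U.length →
        (U.filter (fun y => !((pvStep G m)^[k] S0).contains y)).length + k ≤
          (U.filter (fun y => !((pvStep G m)^[0] S0).contains y)).length := by
      intro k
      induction k with
      | zero => intro _; omega
      | succ k ih =>
        intro hk
        have h1 := ih (by omega)
        have h2 := meas_decrease (iter_subset_univ hS0 hU k) hU (hc k (by omega))
        omega
    have h0 : (U.filter (fun y => !((pvStep G m)^[0] S0).contains y)).length ≤ U.length :=
      List.length_filter_le _ _
    have hN := haux U.length (le_refl _)
    have hzero : (U.filter (fun y => !((pvStep G m)^[U.length] S0).contains y)).length = 0 := by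
      omega
    -- the filter is empty, so every element of U is in the iterate — contradicting non-closure
    have hallU : ∀ y ∈ U, y ∈ (pvStep G m)^[U.length] S0 := by
      intro y hy
      have := List.filter_eq_nil_iff.mp (List.length_eq_zero_iff.mp hzero) y hy
      simp only [Bool.not_eq_eq_eq_not, Bool.not_true, List.contains_eq_mem,
        decide_eq_false_iff_not] at this
      exact not_not.mp this
    refine hc U.length (le_refl _) ?_
    intro x hx
    rcases pvStep_subset_univ hx with h | h
    · exact h
    · exact hallU x (hU x h)
  obtain ⟨k, hk, hcl⟩ := hex
  have := closed_add (U.length - k) hcl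
  simpa [Nat.add_sub_cancel' hk] using this

-- completeness of the saturation: every reachable node is in pvReachSet
theorem reach_mem_closure {G : List (Int × List Int)} {m : List (Int × Bool)} {node y : Int}
    (h : ReachU G m node y) : y ∈ pvReachSet G m node := by
  unfold pvReachSet
  have hS0 : ∀ x, x ∈ (if pvKeyMem m node then ([] : List Int) else [node]) →
      x ∈ node :: G.flatMap (fun p => p.2) := by
    intro x hx
    split at hx
    · cases hx
    · rcases List.mem_cons.mp hx with rfl | hx'
      · exact List.mem_cons_self
      · cases hx'
  have hU : ∀ x, x ∈ G.flatMap (fun p => p.2) → x ∈ node :: G.flatMap (fun p => p.2) :=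
    fun x hx => List.mem_cons_of_mem _ hx
  have hcl := closed_at_univ_len (m := m) hS0 hU
  have hnode : pvKeyMem m node = false →
      node ∈ (pvStep G m)^[(node :: G.flatMap (fun p => p.2)).length]
        (if pvKeyMem m node then ([] : List Int) else [node]) := by
    intro hnm
    exact iter_mono _ _ (by simp [hnm])
  induction h with
  | refl h => exact hnode h
  | step hx hlk hy hunm ih =>
    rename_i x' y' ns'
    by_cases hin : y' ∈ (pvStep G m)^[(node :: G.flatMap (fun p => p.2)).length]
        (if pvKeyMem m node then ([] : List Int) else [node])
    · exact hin
    · exact hcl _ (mem_pvStep.mpr (Or.inr ⟨_, pvLookup_pair_mem hlk, ih, hy, hunm, hin⟩))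

-- ===== VERDICT (by name: the statement is the Claim_ definition above) =====
theorem mark_component_spec : Claim_equal_mark_component := by
  intro G node marked _ hpre
  unfold Spec_mark_component mark_component mark_component_alt
  have H : ∀ y, ReachU G marked node y → (G.map (·.1)).contains y = true :=
    fun y hy => hpre y (reach_mem_closure hy)
  obtain ⟨exA, hndA, hmemA, heqA⟩ := markLoopA_char G [node] marked 0
    (fun y hy => H y (reachU_singleton.mp hy))
  obtain ⟨exB, hndB, hmemB, _, heqB⟩ := (dfsBF_char G (G.length + 1)).1 node marked H
    (by have := pvUnmarked_le G marked; omega)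
  have hperm : exA.Perm exB := (List.perm_ext_iff_of_nodup hndA hndB).mpr (by
    intro a
    rw [hmemA a, hmemB a, reachU_singleton])
  rw [heqA, heqB, hperm.length_eq]
  ring
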